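-- pv_equiv track=rewrite | github.com/shtakasu/scaling_behavior_in_reservoir_computing | utils/ipc.py | gen_delays
-- ===== SOURCE A (Python) =====
-- def gen_delays(window,num):
--     if num==2:
--         return [[0,window]]
--     gen_list = []
--     for i in range(num-2,window):
--         list_ = gen_delays(i,num-1)
--         for j in range(len(list_)):
--            list_[j].append(window)
--         gen_list += list_
--     return gen_list
-- ===== SOURCE B (Python) =====
-- def gen_delays(window, num):
--     if num == 2:
--         return [[0, window]]
--     k = num - 2
--     if k < 0 or window - 1 < k:
--         return []  # fewer than num-2 inner values available
--     # rows[j] = the size-j increasing tuples from {1..n} in colex order, grown n = 1..window-1 (Pascal-style DP)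
--     rows = [[[]]] + [[] for _ in range(k)]
--     for n in range(1, window):
--         for j in range(k, 0, -1):
--             rows[j] += [c + [n] for c in rows[j - 1]]
--     return [[0] + c + [window] for c in rows[k]]
-- ===== Notes on version B (the rewrite author's own statement) =====
-- stated objective: alternative
-- what changed: Replaced A's recursion on num (which re-derives each sub-list of delays per caller via nested recursive calls) by an iterative Pascal-style dynamic program: one table row per tuple length, grown once for each inner value n = 1..window-1 in colex order; no recursion at all.
import Mathlib
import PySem

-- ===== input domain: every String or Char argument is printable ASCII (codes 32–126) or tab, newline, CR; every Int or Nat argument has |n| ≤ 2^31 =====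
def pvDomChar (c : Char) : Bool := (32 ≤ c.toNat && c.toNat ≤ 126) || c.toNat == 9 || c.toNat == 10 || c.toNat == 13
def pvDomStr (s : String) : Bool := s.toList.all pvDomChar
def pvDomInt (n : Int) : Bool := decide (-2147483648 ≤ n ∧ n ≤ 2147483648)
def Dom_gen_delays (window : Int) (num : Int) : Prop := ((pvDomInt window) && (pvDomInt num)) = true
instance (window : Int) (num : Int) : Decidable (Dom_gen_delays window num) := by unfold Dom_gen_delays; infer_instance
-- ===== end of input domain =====

-- B replaces A's recursion on num by an iterative Pascal-style DP over the inner values (objective: alternative algorithm, similar cost).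

-- ===== PORT A =====
-- fuel = num.toNat + 1 bounds the recursion depth; it is never exhausted on inputs where the Python terminates
def gen_delays_go : Nat → Int → Int → List (List Int)
  | 0, _, _ => []
  | fuel+1, window, num =>
    if num == 2 then [[0, window]]
    else
      (PySem.List.pyRange (num - 2) window 1).foldl
        (fun gen_list i =>
          gen_list ++ (gen_delays_go fuel i (num - 1)).map (fun l => l ++ [window])) []

def gen_delays (window : Int) (num : Int) : List (List Int) :=
  gen_delays_go (num.toNat + 1) window num

-- ===== PORT B =====
-- rows[j] += [c + [n] for c in rows[j-1]]
def gen_delays_alt_inner (n : Int) (rows : List (List (List Int))) (j : Int) : List (List (List Int)) :=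
  rows.set j.toNat ((rows.getD j.toNat []) ++ ((rows.getD (j.toNat - 1) []).map (fun c => c ++ [n])))

def gen_delays_alt (window : Int) (num : Int) : List (List Int) :=
  if num == 2 then [[0, window]]
  else
    let k := num - 2
    if k < 0 ∨ window - 1 < k then []
    else
      let rows0 : List (List (List Int)) := [[]] :: List.replicate k.toNat []
      let rows := (PySem.List.pyRange 1 window 1).foldl
        (fun rows n => (PySem.List.pyRange k 0 (-1)).foldl (gen_delays_alt_inner n) rows) rows0
      (rows.getD k.toNat []).map (fun c => [0] ++ c ++ [window])

-- ===== PRECONDITION & SPEC =====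
-- Pre_ excludes exactly the inputs where A recurses forever (num < 2 with a nonempty range), i.e. Python raises RecursionError.
def Pre_gen_delays (window : Int) (num : Int) : Prop := 2 ≤ num ∨ window ≤ num - 2
instance (window : Int) (num : Int) : Decidable (Pre_gen_delays window num) := by
  unfold Pre_gen_delays; infer_instance

def pvWitness_gen_delays : Int × Int := (5, 4)

def Spec_gen_delays (window : Int) (num : Int) (out : List (List Int)) : Prop := out = gen_delays_alt window num
instance (window : Int) (num : Int) (out : List (List Int)) : Decidable (Spec_gen_delays window num out) := by unfold Spec_gen_delays; infer_instance

-- ===== CLAIM (what is proved, stated in full; the proofs are below) =====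
def Claim_equal_gen_delays : Prop := ∀ (window : Int) (num : Int), Dom_gen_delays window num → Pre_gen_delays window num → Spec_gen_delays window num (gen_delays window num)

-- ===== LEMMAS AND PROOFS =====

-- CC n k = the strictly increasing k-tuples over {1..n}, in colex order (Pascal recursion)
def CC : Nat → Nat → List (List Int)
  | _, 0 => [[]]
  | 0, _+1 => []
  | n+1, k+1 => CC n (k+1) ++ (CC n k).map (fun c => c ++ [(n : Int)+1])

theorem CC_eq_nil (n k : Nat) (h : n < k) : CC n k = [] := by
  induction n generalizing k with
  | zero => cases k with
    | zero => omega
    | succ k => simp [CC]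
  | succ n ih =>
    cases k with
    | zero => omega
    | succ k =>
      simp [CC, ih (k+1) (by omega), ih k (by omega)]

-- the A-side fold over i = k+1 .. w-1 builds CC (w-1) (k+1)
theorem foldA_aux (k : Nat) : ∀ (t : Nat),
    (PySem.List.pyRange ((k : Int)+1) ((k : Int)+1+(t : Int)) 1).flatMap
      (fun i => (CC (i-1).toNat k).map (fun c => c ++ [i])) = CC (k+t) (k+1) := by
  intro t
  induction t with
  | zero =>
    rw [PySem.List.pyRange_one_eq_nil (by omega)]
    simp [CC_eq_nil k (k+1) (by omega)]
  | succ t ih =>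
    have h : ((k : Int)+1+((t : Int)+1)) = ((k : Int)+1+(t : Int)) + 1 := by ring
    push_cast
    rw [h, PySem.List.pyRange_one_succ_right (by omega), List.flatMap_append]
    push_cast at ih
    rw [ih]
    have h2 : (((k : Int)+1+(t : Int))-1).toNat = k + t := by omega
    simp only [List.flatMap_cons, List.flatMap_nil, List.append_nil, h2]
    have h3 : ((k : Int)+1+(t : Int)) = ((k+t : Nat) : Int) + 1 := by push_cast; ring
    rw [h3]
    rfl

theorem foldA (k : Nat) (w : Int) :
    (PySem.List.pyRange ((k : Int)+1) w 1).flatMap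
      (fun i => (CC (i-1).toNat k).map (fun c => c ++ [i])) = CC (w-1).toNat (k+1) := by
  by_cases h : w ≤ (k : Int)+1
  · rw [PySem.List.pyRange_one_eq_nil h]
    rw [CC_eq_nil (w-1).toNat (k+1) (by omega)]
    rfl
  · have ht : w = (k : Int)+1+((w - (k+1)).toNat : Int) := by omega
    have h2 : (w-1).toNat = k + (w - (k+1)).toNat := by omega
    conv_lhs => rw [ht]
    rw [foldA_aux k (w - (k+1)).toNat, h2]

-- A's recursion computes CC, wrapped with 0 and window
theorem gen_delays_go_eq (k : Nat) : ∀ (fuel : Nat) (window : Int), k < fuel →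
    gen_delays_go fuel window ((k : Int)+2)
      = (CC (window-1).toNat k).map (fun c => 0 :: c ++ [window]) := by
  induction k with
  | zero =>
    intro fuel window h
    match fuel, h with
    | fuel+1, _ => simp [gen_delays_go, CC]
  | succ k ih =>
    intro fuel window h
    match fuel, h with
    | fuel+1, h =>
      have hne : ((((k : Int)+1)+2) == 2) = false := by
        simp; omega
      show (if ((((k : Int)+1)+2) == 2) then _ else _) = _
      rw [hne]
      simp only [Bool.false_eq_true, if_false]
      have hrange : (((k : Int)+1)+2) - 2 = (k : Int)+1 := by ring
      have hnum : (((k : Int)+1)+2) - 1 = (k : Int)+2 := by ring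
      push_cast
      rw [hrange, hnum]
      have hfun : (fun (gen_list : List (List Int)) (i : Int) =>
            gen_list ++ (gen_delays_go fuel i ((k : Int)+2)).map (fun l => l ++ [window]))
          = (fun gen_list i =>
            gen_list ++ ((CC (i-1).toNat k).map (fun c => c ++ [i])).map (fun c => 0 :: c ++ [window])) := by
        funext gen_list i
        rw [ih fuel i (by omega)]
        simp [List.map_map, Function.comp_def]
      rw [hfun]
      rw [PySem.List.foldl_append_eq_flatMap]
      rw [List.nil_append]
      have : ∀ (l : List (List Int)),
          (l.map (fun c => c ++ [window])) = l.map (fun c => c ++ [window]) := fun _ => rfl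
      calc (PySem.List.pyRange ((k : Int)+1) window 1).flatMap
              (fun i => ((CC (i-1).toNat k).map (fun c => c ++ [i])).map (fun c => 0 :: c ++ [window]))
          = ((PySem.List.pyRange ((k : Int)+1) window 1).flatMap
              (fun i => (CC (i-1).toNat k).map (fun c => c ++ [i]))).map (fun c => 0 :: c ++ [window]) := by
            rw [List.map_flatMap]
        _ = (CC (window-1).toNat (k+1)).map (fun c => 0 :: c ++ [window]) := by rw [foldA]

-- B side: the table of rows
def Mix (n k j : Nat) : List (List (List Int)) :=
  (List.range (k+1)).map (fun i => if i ≤ j then CC n i else CC (n+1) i)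

theorem rows0_eq (k : Nat) :
    ([([] : List Int)] : List (List Int)) :: List.replicate k [] = Mix 0 k k := by
  apply List.ext_getElem
  · simp [Mix]
  · intro i h1 h2
    simp [Mix] at h2 ⊢
    cases i with
    | zero => simp [CC]
    | succ i =>
      have hik : i + 1 ≤ k := by simpa [Mix] using h2
      simp only [Mix, List.getElem_cons_succ, List.getElem_map, List.getElem_range,
        List.getElem_replicate]
      rw [if_pos hik, CC_eq_nil 0 (i+1) (by omega)]

theorem inner_step (n k j : Nat) (hj : j + 1 ≤ k) :
    gen_delays_alt_inner ((n : Int)+1) (Mix n k (j+1)) ((j : Int)+1) = Mix n k j := by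
  unfold gen_delays_alt_inner
  have htn : (((j : Int)+1)).toNat = j + 1 := by omega
  rw [htn]
  have hlen : (Mix n k (j+1)).length = k + 1 := by simp [Mix]
  have hget : ∀ (m : Nat), m < k+1 → (Mix n k (j+1)).getD m [] = (if m ≤ j+1 then CC n m else CC (n+1) m) := by
    intro m hm
    rw [List.getD_eq_getElem _ _ (by omega : m < (Mix n k (j+1)).length)]
    simp [Mix]
  rw [hget (j+1) (by omega), hget ((j+1)-1) (by omega)]
  simp only [Nat.add_sub_cancel]
  rw [if_pos (by omega : j+1 ≤ j+1), if_pos (by omega : j ≤ j+1)]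
  apply List.ext_getElem
  · simp [Mix]
  · intro i h1 h2
    have hik : i < k + 1 := by simpa [Mix] using h2
    by_cases hij : i = j + 1
    · subst hij
      rw [List.getElem_set_self (by omega)]
      simp only [Mix, List.getElem_map, List.getElem_range]
      rw [if_neg (by omega)]
      show CC n (j+1) ++ (CC n j).map (fun c => c ++ [(n : Int)+1]) = CC (n+1) (j+1)
      rfl
    · rw [List.getElem_set_ne (by omega)]
      simp only [Mix, List.getElem_map, List.getElem_range]
      by_cases h : i ≤ j
      · rw [if_pos (by omega), if_pos h]
      · rw [if_neg (by omega), if_neg h]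

theorem inner_fold (n k : Nat) : ∀ (j : Nat), j ≤ k →
    (PySem.List.pyRange (j : Int) 0 (-1)).foldl (gen_delays_alt_inner ((n : Int)+1)) (Mix n k j)
      = Mix n k 0 := by
  intro j
  induction j with
  | zero =>
    intro _
    rw [PySem.List.pyRange_neg_one_eq_nil (by omega)]
    rfl
  | succ j ih =>
    intro hj
    have : ((j+1 : Nat) : Int) = ((j : Int)+1) := by push_cast; ring
    rw [this, PySem.List.pyRange_neg_one_cons (by omega)]
    have hstep : ((j : Int)+1) - 1 = (j : Int) := by ring
    rw [List.foldl_cons, inner_step n k j hj, hstep]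
    exact ih (by omega)

theorem mix_zero (n k : Nat) : Mix n k 0 = Mix (n+1) k k := by
  apply List.ext_getElem
  · simp [Mix]
  · intro i h1 h2
    have hik : i < k + 1 := by simpa [Mix] using h2
    simp only [Mix, List.getElem_map, List.getElem_range]
    cases i with
    | zero => simp [CC]
    | succ i => rw [if_neg (by omega), if_pos (by omega : i+1 ≤ k)]

theorem outer_fold (k : Nat) : ∀ (t : Nat),
    (PySem.List.pyRange 1 (1+(t : Int)) 1).foldl
      (fun rows n => (PySem.List.pyRange (k : Int) 0 (-1)).foldl (gen_delays_alt_inner n) rows)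
      (Mix 0 k k)
      = Mix t k k := by
  intro t
  induction t with
  | zero =>
    rw [PySem.List.pyRange_one_eq_nil (by omega)]
    rfl
  | succ t ih =>
    have h : (1+((t : Int)+1)) = (1+(t : Int)) + 1 := by ring
    push_cast
    rw [h, PySem.List.pyRange_one_succ_right (by omega), List.foldl_append]
    push_cast at ih
    rw [ih]
    have h2 : (1+(t : Int)) = ((t : Int)+1) := by ring
    show (PySem.List.pyRange (k : Int) 0 (-1)).foldl (gen_delays_alt_inner (1+(t : Int))) (Mix t k k) = _
    rw [h2]
    have := inner_fold t k k (le_refl k)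
    rw [← mix_zero t k, ← this]

theorem gen_delays_alt_eq (k : Nat) (window : Int) :
    gen_delays_alt window ((k : Int)+2)
      = (CC (window-1).toNat k).map (fun c => [0] ++ c ++ [window]) := by
  cases k with
  | zero =>
    simp [gen_delays_alt, CC]
  | succ k =>
    unfold gen_delays_alt
    rw [if_neg (by simp; omega)]
    simp only
    push_cast
    by_cases hw : window - 1 < ((k : Int)+1)
    · rw [if_pos (by omega : ((((k : Int)+1)+2) - 2 < 0 ∨ window - 1 < (((k : Int)+1)+2) - 2))]
      rw [CC_eq_nil (window-1).toNat (k+1) (by omega)]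
      rfl
    rw [if_neg (by omega : ¬ ((((k : Int)+1)+2) - 2 < 0 ∨ window - 1 < (((k : Int)+1)+2) - 2))]
    have hk2 : (((k : Int)+1)+2) - 2 = ((k : Int)+1) := by ring
    rw [hk2]
    have htn : ((k : Int)+1).toNat = k+1 := by omega
    rw [htn]
    have hrange : PySem.List.pyRange 1 window 1
        = PySem.List.pyRange 1 (1 + (((window-1).toNat : Nat) : Int)) 1 := by
      by_cases h : window ≤ 1
      · rw [PySem.List.pyRange_one_eq_nil h, PySem.List.pyRange_one_eq_nil (by omega)]
      · congr 1; omega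
    have hout := outer_fold (k+1) (window-1).toNat
    push_cast at hout
    rw [rows0_eq (k+1), hrange, hout]
    have hlast : (Mix (window-1).toNat (k+1) (k+1)).getD (k+1) []
        = CC (window-1).toNat (k+1) := by
      rw [List.getD_eq_getElem _ _ (by simp [Mix] : k+1 < (Mix (window-1).toNat (k+1) (k+1)).length)]
      simp [Mix]
    rw [hlast]

-- ===== VERDICT (by name: the statement is the Claim_ definition above) =====
theorem gen_delays_spec : Claim_equal_gen_delays := by
  intro window num _ hPre
  unfold Spec_gen_delays
  by_cases h2 : 2 ≤ num
  · have hk : num = (((num - 2).toNat : Nat) : Int) + 2 := by omega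
    rw [show gen_delays window num = gen_delays_go (num.toNat + 1) window num from rfl]
    rw [hk]
    rw [gen_delays_go_eq (num - 2).toNat _ window (by omega),
      gen_delays_alt_eq (num - 2).toNat window]
    simp
  · have hsmall : window ≤ num - 2 := by
      rcases hPre with h | h
      · omega
      · exact h
    have hnum2 : num ≠ 2 := by omega
    have hA : gen_delays window num = [] := by
      show gen_delays_go (num.toNat + 1) window num = []
      show (if (num == 2) then _ else _) = _
      rw [if_neg (by simpa using hnum2)]
      rw [PySem.List.pyRange_one_eq_nil hsmall]
      rfl
    have hB : gen_delays_alt window num = [] := by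
      unfold gen_delays_alt
      rw [if_neg (by simpa using hnum2)]
      simp only
      rw [if_pos (by omega : num - 2 < 0 ∨ window - 1 < num - 2)]
    rw [hA, hB]
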